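-- pv_equiv track=rewrite | github.com/kylegrowthx/context-os-starterkit | projects/fathom-backup/convert-to-transcript.py | resolve_participant_names
-- ===== SOURCE A (Python) =====
-- def resolve_participant_names(participants, transcript):
--     """Build a deduplicated participant name list from calendar invitees and transcript speakers."""
--     names = []
--     seen = set()
--
--     if participants:
--         for p in participants:
--             name = p.get("name", "")
--             email = p.get("email", "")
--             display = p.get("matched_speaker_display_name")
--
--             if display:
--                 key = display.lower()
--                 if key not in seen:
--                     names.append(display)
--                     seen.add(key)
--             elif name and name != email:
--                 key = name.lower()
--                 if key not in seen:
--                     names.append(name)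
--                     seen.add(key)
--             elif email:
--                 local = email.split("@")[0]
--                 friendly = local.replace(".", " ").replace("-", " ").title()
--                 key = friendly.lower()
--                 if key not in seen:
--                     names.append(friendly)
--                     seen.add(key)
--
--     if transcript and isinstance(transcript, list):
--         for entry in transcript:
--             speaker = entry.get("speaker", {})
--             name = speaker.get("display_name", "")
--             if name and name.lower() not in seen:
--                 names.append(name)
--                 seen.add(name.lower())
--
--     return names
-- ===== SOURCE B (Python) =====
-- def _candidate(p):
--     """The single name this participant contributes, or None."""
--     display = p.get("matched_speaker_display_name")
--     name = p.get("name", "")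
--     email = p.get("email", "")
--     if display:
--         return display
--     if name and name != email:
--         return name
--     if email:
--         local = email.split("@")[0]
--         return local.replace(".", " ").replace("-", " ").title()
--     return None
--
--
-- def resolve_participant_names(participants, transcript):
--     """Build a deduplicated participant name list from calendar invitees and transcript speakers."""
--     # Stage 1: flat ordered candidate list (no dedup state anywhere).
--     cands = [c for c in map(_candidate, participants or []) if c is not None]
--     if isinstance(transcript, list):
--         cands += [n for n in (e.get("speaker", {}).get("display_name", "") for e in transcript) if n]
--     # Stage 2: delete-ahead dedup: emit the head, delete every later
--     # case-insensitive duplicate of it from the worklist, repeat.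
--     names = []
--     rest = cands
--     while rest:
--         head = rest[0]
--         k = head.lower()
--         names.append(head)
--         rest = [c for c in rest[1:] if c.lower() != k]
--     return names
-- ===== Notes on version B (the rewrite author's own statement) =====
-- stated objective: alternative
-- what changed: B first builds a flat ordered candidate list (priority cascade per participant, then transcript speakers) and then dedups it with a delete-ahead worklist loop -- emit the head, delete all later case-insensitive duplicates of it from the remaining list, repeat -- so it keeps no seen-set at all, unlike A's single interleaved loop that tests and updates a lowercase-key set inside every branch.
import Mathlib
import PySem

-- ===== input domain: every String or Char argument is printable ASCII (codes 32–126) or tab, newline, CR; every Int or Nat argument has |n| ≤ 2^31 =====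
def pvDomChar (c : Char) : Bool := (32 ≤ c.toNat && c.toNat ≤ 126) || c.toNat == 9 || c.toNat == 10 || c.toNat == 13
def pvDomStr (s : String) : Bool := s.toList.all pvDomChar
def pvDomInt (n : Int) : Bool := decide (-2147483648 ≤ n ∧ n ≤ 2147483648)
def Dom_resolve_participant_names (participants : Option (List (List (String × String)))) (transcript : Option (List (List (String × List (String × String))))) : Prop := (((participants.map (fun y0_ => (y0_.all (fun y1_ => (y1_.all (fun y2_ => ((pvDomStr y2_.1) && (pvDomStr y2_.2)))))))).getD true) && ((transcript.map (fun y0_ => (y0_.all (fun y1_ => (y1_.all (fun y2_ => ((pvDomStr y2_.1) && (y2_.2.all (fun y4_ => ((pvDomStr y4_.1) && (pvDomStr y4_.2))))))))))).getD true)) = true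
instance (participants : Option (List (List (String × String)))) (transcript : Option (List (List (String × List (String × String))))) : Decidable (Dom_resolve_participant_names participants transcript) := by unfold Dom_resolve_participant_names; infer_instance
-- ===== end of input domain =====

-- B first extracts a flat ordered candidate list, then dedups with a delete-ahead worklist
-- (emit the head, delete its later case-insensitive duplicates) instead of A's interleaved
-- seen-set loop ('alternative': no seen-set, different dedup algorithm).

-- ===== PORT A =====
-- str.title(): uppercase a char after a non-cased char, lowercase otherwise (exact on ASCII)
def pvTitleChars : List Char → Bool → List Char
  | [], _ => []
  | c :: cs, prevAlpha =>
    (if prevAlpha then PySem.Chars.lowerChar c else PySem.Chars.upperChar c) ::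
      pvTitleChars cs (PySem.Chars.isalpha c)

def pvTitle (s : String) : String := String.ofList (pvTitleChars s.toList false)

-- email.split("@")[0].replace(".", " ").replace("-", " ").title()
def pvFriendly (email : String) : String :=
  let loc := (match PySem.Str.split? email "@" with | some (l :: _) => l | _ => "")
  pvTitle (PySem.Str.replace (PySem.Str.replace loc "." " ") "-" " ")

-- body of A's participants loop; (names, seen) are the two accumulators
def pvAStepP (st : List String × PySem.Set String) (p : List (String × String)) :
    List String × PySem.Set String :=
  let name := PySem.Dict.getD ⟨p⟩ "name" ""
  let email := PySem.Dict.getD ⟨p⟩ "email" ""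
  let display := (PySem.Dict.get? ⟨p⟩ "matched_speaker_display_name").getD ""
  if display ≠ "" then
    let key := PySem.Str.lower display
    if PySem.Set.contains st.2 key then st else (st.1 ++ [display], PySem.Set.add st.2 key)
  else if name ≠ "" ∧ name ≠ email then
    let key := PySem.Str.lower name
    if PySem.Set.contains st.2 key then st else (st.1 ++ [name], PySem.Set.add st.2 key)
  else if email ≠ "" then
    let friendly := pvFriendly email
    let key := PySem.Str.lower friendly
    if PySem.Set.contains st.2 key then st else (st.1 ++ [friendly], PySem.Set.add st.2 key)
  else st

-- body of A's transcript loop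
def pvAStepT (st : List String × PySem.Set String) (entry : List (String × List (String × String))) :
    List String × PySem.Set String :=
  let speaker := PySem.Dict.getD ⟨entry⟩ "speaker" []
  let name := PySem.Dict.getD ⟨speaker⟩ "display_name" ""
  if name ≠ "" ∧ ¬ PySem.Set.contains st.2 (PySem.Str.lower name) then
    (st.1 ++ [name], PySem.Set.add st.2 (PySem.Str.lower name))
  else st

def resolve_participant_names (participants : Option (List (List (String × String)))) (transcript : Option (List (List (String × List (String × String))))) : List String :=
  let st0 : List String × PySem.Set String := ([], PySem.Set.empty)
  let st1 :=
    match participants with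
    | some ps => if ps = [] then st0 else ps.foldl pvAStepP st0   -- 'if participants:'
    | none => st0
  let st2 :=
    match transcript with
    | some ts => if ts = [] then st1 else ts.foldl pvAStepT st1   -- 'if transcript and isinstance(..., list):'
    | none => st1
  st2.1

-- ===== PORT B =====
-- B's _candidate(p): the name a participant contributes, if any (none = None)
def pvCandP (p : List (String × String)) : Option String :=
  let display := (PySem.Dict.get? ⟨p⟩ "matched_speaker_display_name").getD ""
  let name := PySem.Dict.getD ⟨p⟩ "name" ""
  let email := PySem.Dict.getD ⟨p⟩ "email" ""
  if display ≠ "" then some display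
  else if name ≠ "" ∧ name ≠ email then some name
  else if email ≠ "" then some (pvFriendly email)
  else none

-- the speaker name a transcript entry contributes, if nonempty
def pvCandT (entry : List (String × List (String × String))) : Option String :=
  let speakerName := PySem.Dict.getD ⟨PySem.Dict.getD ⟨entry⟩ "speaker" []⟩ "display_name" ""
  if speakerName ≠ "" then some speakerName else none

-- B's while loop: emit the head, delete its later case-insensitive duplicates, repeat
def pvDedupLoop (names : List String) (rest : List String) : List String :=
  match rest with
  | [] => names
  | head :: tl =>
      pvDedupLoop (names ++ [head])
        (tl.filter (fun c => PySem.Str.lower c ≠ PySem.Str.lower head))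
termination_by rest.length
decreasing_by simpa [Nat.lt_succ_iff] using (List.length_filter_le _ _).trans (by simp)

def resolve_participant_names_alt (participants : Option (List (List (String × String)))) (transcript : Option (List (List (String × List (String × String))))) : List String :=
  let cands :=
    (participants.getD []).filterMap pvCandP ++ (transcript.getD []).filterMap pvCandT
  pvDedupLoop [] cands

-- ===== PRECONDITION & SPEC =====
def Spec_resolve_participant_names (participants : Option (List (List (String × String)))) (transcript : Option (List (List (String × List (String × String))))) (out : List String) : Prop := out = resolve_participant_names_alt participants transcript
instance (participants : Option (List (List (String × String)))) (transcript : Option (List (List (String × List (String × String))))) (out : List String) : Decidable (Spec_resolve_participant_names participants transcript out) := by unfold Spec_resolve_participant_names; infer_instance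

-- ===== CLAIM (what is proved, stated in full; the proofs are below) =====
def Claim_equal_resolve_participant_names : Prop := ∀ (participants : Option (List (List (String × String)))) (transcript : Option (List (List (String × List (String × String))))), Dom_resolve_participant_names participants transcript → Spec_resolve_participant_names participants transcript (resolve_participant_names participants transcript)

-- ===== LEMMAS AND PROOFS =====
-- proof-side bridge: the generic step A's interleaved branches all reduce to
def pvDedupStep (st : List String × PySem.Set String) (c : String) :
    List String × PySem.Set String :=
  let k := PySem.Str.lower c
  if PySem.Set.contains st.2 k then st else (st.1 ++ [c], PySem.Set.add st.2 k)

theorem pvAStepP_eq (st : List String × PySem.Set String) (p : List (String × String)) :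
    pvAStepP st p = (pvCandP p).elim st (pvDedupStep st) := by
  simp only [pvAStepP, pvCandP]
  split_ifs <;> simp_all [pvDedupStep]

theorem pvAStepT_eq (st : List String × PySem.Set String)
    (entry : List (String × List (String × String))) :
    pvAStepT st entry = (pvCandT entry).elim st (pvDedupStep st) := by
  simp only [pvAStepT, pvCandT]
  split_ifs <;> simp_all [pvDedupStep, PySem.Set.add_of_not_mem]

theorem foldl_filterMap_P (ps : List (List (String × String)))
    (st : List String × PySem.Set String) :
    ps.foldl pvAStepP st = (ps.filterMap pvCandP).foldl pvDedupStep st := by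
  induction ps generalizing st with
  | nil => rfl
  | cons p ps ih =>
    simp only [List.foldl_cons, List.filterMap_cons, pvAStepP_eq]
    cases h : pvCandP p <;> simp [ih]

theorem foldl_filterMap_T (ts : List (List (String × List (String × String))))
    (st : List String × PySem.Set String) :
    ts.foldl pvAStepT st = (ts.filterMap pvCandT).foldl pvDedupStep st := by
  induction ts generalizing st with
  | nil => rfl
  | cons t ts ih =>
    simp only [List.foldl_cons, List.filterMap_cons, pvAStepT_eq]
    cases h : pvCandT t <;> simp [ih]

-- unfolding equations for the worklist loop (well-founded definition)
theorem pvDedupLoop_nil (ns : List String) : pvDedupLoop ns [] = ns := by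
  rw [pvDedupLoop.eq_def]

theorem pvDedupLoop_cons (ns : List String) (head : String) (tl : List String) :
    pvDedupLoop ns (head :: tl) =
      pvDedupLoop (ns ++ [head])
        (tl.filter (fun c => PySem.Str.lower c ≠ PySem.Str.lower head)) := by
  rw [pvDedupLoop.eq_def]

-- the seen-set foldl equals the delete-ahead worklist loop on the not-yet-seen candidates
theorem foldl_eq_dedupLoop (cs : List String) (ns : List String) (s : PySem.Set String) :
    (cs.foldl pvDedupStep (ns, s)).1 =
      pvDedupLoop ns (cs.filter (fun c => ¬ PySem.Set.contains s (PySem.Str.lower c))) := by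
  induction cs generalizing ns s with
  | nil => simp [pvDedupLoop_nil]
  | cons c cs ih =>
    simp only [List.foldl_cons, List.filter_cons, pvDedupStep]
    by_cases h : PySem.Str.lower c ∈ s
    · simp [h, ih]
    · have hc : ¬ PySem.Set.contains s (PySem.Str.lower c) = true :=
        fun hh => h ((PySem.Set.contains_iff _ _).mp hh)
      rw [if_neg hc, if_pos (by simpa using hc)]
      rw [ih, pvDedupLoop_cons, List.filter_filter]
      congr 1
      apply List.filter_congr
      intro d _
      by_cases h1 : PySem.Str.lower d ∈ s <;>
        by_cases h2 : PySem.Str.lower d = PySem.Str.lower c <;>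
          simp [h1, h2, h]

-- ===== VERDICT (by name: the statement is the Claim_ definition above) =====
theorem resolve_participant_names_spec : Claim_equal_resolve_participant_names := by
  intro participants transcript _
  show _ = _
  have hempty : ∀ cs : List String,
      (cs.foldl pvDedupStep ([], PySem.Set.empty)).1 = pvDedupLoop [] cs := by
    intro cs
    rw [foldl_eq_dedupLoop]
    congr 1
    simp [PySem.Set.empty, PySem.Set.contains]
  simp only [resolve_participant_names, resolve_participant_names_alt]
  cases participants with
  | none =>
    cases transcript with
    | none => simp [pvDedupLoop_nil]
    | some ts =>
      rcases eq_or_ne ts [] with rfl | h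
      · simp [Option.getD, pvDedupLoop_nil]
      · simp only [if_neg h, foldl_filterMap_T, Option.getD]
        simpa using hempty (ts.filterMap pvCandT)
  | some ps =>
    cases transcript with
    | none =>
      rcases eq_or_ne ps [] with rfl | h
      · simp [Option.getD, pvDedupLoop_nil]
      · simp only [if_neg h, foldl_filterMap_P, Option.getD]
        simpa using hempty (ps.filterMap pvCandP)
    | some ts =>
      rcases eq_or_ne ps [] with rfl | hp <;> rcases eq_or_ne ts [] with rfl | ht
      · simp [Option.getD, pvDedupLoop_nil]
      · simp only [if_neg ht, foldl_filterMap_T, Option.getD]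
        simpa using hempty (ts.filterMap pvCandT)
      · simp only [if_neg hp, foldl_filterMap_P, Option.getD]
        simpa using hempty (ps.filterMap pvCandP)
      · simp only [if_neg hp, if_neg ht, foldl_filterMap_P, foldl_filterMap_T, Option.getD,
          ← List.foldl_append]
        exact hempty (ps.filterMap pvCandP ++ ts.filterMap pvCandT)
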